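-- pv_equiv track=rewrite | github.com/Glindeb/AES-Python | src/AES_Module/AES.py | inv_mix_columns
-- ===== SOURCE A (Python) =====
-- def xtime(a):
--     return (((a << 1) ^ 0x1B) & 0xFF) if (a & 0x80) else (a << 1)
--
-- def mix_columns(data):
--     def mix_single_column(data):
--         # see Sec 4.1.2 in The Design of Rijndael
--         t = data[0] ^ data[1] ^ data[2] ^ data[3]
--         u = data[0]
--         data[0] ^= t ^ xtime(data[0] ^ data[1])
--         data[1] ^= t ^ xtime(data[1] ^ data[2])
--         data[2] ^= t ^ xtime(data[2] ^ data[3])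
--         data[3] ^= t ^ xtime(data[3] ^ u)
--
--     def mix(data):
--         for i in range(4):
--             mix_single_column(data[i])
--         return data
--     data = mix(data)
--     return data
--
-- def inv_mix_columns(data):
--     # see Sec 4.1.3 in The Design of Rijndael
--     for i in range(4):
--         u = xtime(xtime(data[i][0] ^ data[i][2]))
--         v = xtime(xtime(data[i][1] ^ data[i][3]))
--         data[i][0] ^= u
--         data[i][1] ^= v
--         data[i][2] ^= u
--         data[i][3] ^= v
--     mix_columns(data)
--     return data
-- ===== SOURCE B (Python) =====
-- def xtime(a):
--     return (((a << 1) ^ 0x1B) & 0xFF) if (a & 0x80) else (a << 1)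
--
-- def inv_mix_columns(data):
--     # Direct one-shot inverse MixColumns: each column is replaced by a closed
--     # XOR formula of its snapshotted four entries (shared subterms t, u, v),
--     # instead of A's preprocess-then-forward-MixColumns two-phase mutation.
--     for i in range(4):
--         a, b, c, d = data[i][0], data[i][1], data[i][2], data[i][3]
--         t = a ^ b ^ c ^ d
--         u = xtime(xtime(a ^ c))
--         v = xtime(xtime(b ^ d))
--         w = u ^ v
--         data[i][0] = a ^ u ^ t ^ xtime(a ^ b ^ w)
--         data[i][1] = b ^ v ^ t ^ xtime(b ^ c ^ w)
--         data[i][2] = c ^ u ^ t ^ xtime(c ^ d ^ w)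
--         data[i][3] = d ^ v ^ t ^ xtime(d ^ a ^ w)
--     return data
-- ===== Notes on version B (the rewrite author's own statement) =====
-- stated objective: idiomatic
-- what changed: A implements inverse MixColumns as a preprocessing pass (u/v corrections) followed by the forward mix_columns with four sequential in-place ^= updates per column; B computes each column's four outputs in one shot from a snapshot of its entries via a direct closed XOR formula, with no forward-MixColumns phase and no sequential mutation dependencies.
import Mathlib
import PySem

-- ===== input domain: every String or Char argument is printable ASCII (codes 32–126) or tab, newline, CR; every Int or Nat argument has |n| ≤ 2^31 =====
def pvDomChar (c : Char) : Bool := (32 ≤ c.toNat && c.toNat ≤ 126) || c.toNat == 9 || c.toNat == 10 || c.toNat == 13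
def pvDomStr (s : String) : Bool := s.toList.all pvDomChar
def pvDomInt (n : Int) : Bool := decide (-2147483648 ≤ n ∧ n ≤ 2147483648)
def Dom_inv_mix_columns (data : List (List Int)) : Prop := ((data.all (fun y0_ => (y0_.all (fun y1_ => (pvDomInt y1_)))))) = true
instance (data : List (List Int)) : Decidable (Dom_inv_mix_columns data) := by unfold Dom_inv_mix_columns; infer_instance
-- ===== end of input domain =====

-- B replaces A's preprocess-then-forward-MixColumns two-phase in-place mutation by a direct
-- one-shot closed XOR formula per column (idiomatic inverse MixColumns); return values proved
-- equal — A mutates its argument in place, B rebuilds the rows (side effects differ, values agree).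


-- ===== PORT A =====
-- xtime(a)  (module-level helper shared by both Python files, identical text in Source A and Source B)
def pyXtime (a : Int) : Int :=
  if PySem.Int.band a 0x80 ≠ 0 then PySem.Int.band (PySem.Int.bxor (a <<< 1) 0x1B) 0xFF
  else a <<< 1

-- mix_single_column: four sequential in-place ^= updates on the row
def pyMixSingleColumn (r : List Int) : List Int :=
  let t := PySem.Int.bxor (PySem.Int.bxor (PySem.Int.bxor (r.getD 0 0) (r.getD 1 0)) (r.getD 2 0)) (r.getD 3 0)
  let u := r.getD 0 0
  let r := r.set 0 (PySem.Int.bxor (r.getD 0 0) (PySem.Int.bxor t (pyXtime (PySem.Int.bxor (r.getD 0 0) (r.getD 1 0)))))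
  let r := r.set 1 (PySem.Int.bxor (r.getD 1 0) (PySem.Int.bxor t (pyXtime (PySem.Int.bxor (r.getD 1 0) (r.getD 2 0)))))
  let r := r.set 2 (PySem.Int.bxor (r.getD 2 0) (PySem.Int.bxor t (pyXtime (PySem.Int.bxor (r.getD 2 0) (r.getD 3 0)))))
  let r := r.set 3 (PySem.Int.bxor (r.getD 3 0) (PySem.Int.bxor t (pyXtime (PySem.Int.bxor (r.getD 3 0) u))))
  r

-- mix_columns: for i in range(4): mix_single_column(data[i])
def pyMixColumns (data : List (List Int)) : List (List Int) :=
  (PySem.List.pyRange 0 4 1).foldl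
    (fun d i => d.set i.toNat (pyMixSingleColumn (d.getD i.toNat []))) data

def inv_mix_columns (data : List (List Int)) : List (List Int) :=
  let data := (PySem.List.pyRange 0 4 1).foldl (fun d i =>
    let row := d.getD i.toNat []
    let u := pyXtime (pyXtime (PySem.Int.bxor (row.getD 0 0) (row.getD 2 0)))
    let v := pyXtime (pyXtime (PySem.Int.bxor (row.getD 1 0) (row.getD 3 0)))
    let row := row.set 0 (PySem.Int.bxor (row.getD 0 0) u)
    let row := row.set 1 (PySem.Int.bxor (row.getD 1 0) v)
    let row := row.set 2 (PySem.Int.bxor (row.getD 2 0) u)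
    let row := row.set 3 (PySem.Int.bxor (row.getD 3 0) v)
    d.set i.toNat row) data
  pyMixColumns data

-- ===== PORT B =====
def inv_mix_columns_alt (data : List (List Int)) : List (List Int) :=
  (PySem.List.pyRange 0 4 1).foldl (fun d i =>
    let r := d.getD i.toNat []
    let a := r.getD 0 0
    let b := r.getD 1 0
    let c := r.getD 2 0
    let e := r.getD 3 0
    let t := PySem.Int.bxor (PySem.Int.bxor (PySem.Int.bxor a b) c) e
    let u := pyXtime (pyXtime (PySem.Int.bxor a c))
    let v := pyXtime (pyXtime (PySem.Int.bxor b e))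
    let w := PySem.Int.bxor u v
    let r := r.set 0 (PySem.Int.bxor (PySem.Int.bxor (PySem.Int.bxor a u) t) (pyXtime (PySem.Int.bxor (PySem.Int.bxor a b) w)))
    let r := r.set 1 (PySem.Int.bxor (PySem.Int.bxor (PySem.Int.bxor b v) t) (pyXtime (PySem.Int.bxor (PySem.Int.bxor b c) w)))
    let r := r.set 2 (PySem.Int.bxor (PySem.Int.bxor (PySem.Int.bxor c u) t) (pyXtime (PySem.Int.bxor (PySem.Int.bxor c e) w)))
    let r := r.set 3 (PySem.Int.bxor (PySem.Int.bxor (PySem.Int.bxor e v) t) (pyXtime (PySem.Int.bxor (PySem.Int.bxor e a) w)))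
    d.set i.toNat r) data

-- ===== PRECONDITION & SPEC =====
-- Pre_ excludes exactly the inputs on which A raises IndexError: fewer than 4 rows, or one of
-- the first 4 rows shorter than 4 entries.
def Pre_inv_mix_columns (data : List (List Int)) : Prop :=
  4 ≤ data.length ∧ ∀ r ∈ data.take 4, 4 ≤ r.length
instance (data : List (List Int)) : Decidable (Pre_inv_mix_columns data) := by
  unfold Pre_inv_mix_columns; infer_instance

def pvWitness_inv_mix_columns : List (List Int) :=
  [[1, 2, 3, 4], [5, 6, 7, 8], [9, 10, 11, 12], [13, 14, 15, 16]]

def Spec_inv_mix_columns (data : List (List Int)) (out : List (List Int)) : Prop := out = inv_mix_columns_alt data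
instance (data : List (List Int)) (out : List (List Int)) : Decidable (Spec_inv_mix_columns data out) := by unfold Spec_inv_mix_columns; infer_instance

-- ===== CLAIM (what is proved, stated in full; the proofs are below) =====
def Claim_equal_inv_mix_columns : Prop := ∀ (data : List (List Int)), Dom_inv_mix_columns data → Pre_inv_mix_columns data → Spec_inv_mix_columns data (inv_mix_columns data)

-- ===== LEMMAS AND PROOFS =====

theorem bxor_coe_negSucc (m n : Nat) :
    PySem.Int.bxor (m : Int) (Int.negSucc n) = Int.negSucc (m ^^^ n) := by
  have h1 : (0:Int) ≤ (m:Int) := Int.natCast_nonneg m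
  have h2 : ¬ (0:Int) ≤ Int.negSucc n := by simp [Int.negSucc_eq]; omega
  have h3 : (-(Int.negSucc n) - 1).toNat = n := by simp [Int.negSucc_eq]
  simp only [PySem.Int.bxor, h1, h2, if_false, if_pos, h3]
  simp [Int.negSucc_eq]; omega

theorem bxor_negSucc_coe (m n : Nat) :
    PySem.Int.bxor (Int.negSucc m) (n : Int) = Int.negSucc (m ^^^ n) := by
  have h1 : (0:Int) ≤ (n:Int) := Int.natCast_nonneg n
  have h2 : ¬ (0:Int) ≤ Int.negSucc m := by simp [Int.negSucc_eq]; omega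
  have h3 : (-(Int.negSucc m) - 1).toNat = m := by simp [Int.negSucc_eq]
  simp only [PySem.Int.bxor, h1, h2, if_false, if_pos, h3]
  simp [Int.negSucc_eq]; omega

theorem bxor_negSucc_negSucc (m n : Nat) :
    PySem.Int.bxor (Int.negSucc m) (Int.negSucc n) = ((m ^^^ n : Nat) : Int) := by
  have h2 : ¬ (0:Int) ≤ Int.negSucc m := by simp [Int.negSucc_eq]; omega
  have h2' : ¬ (0:Int) ≤ Int.negSucc n := by simp [Int.negSucc_eq]; omega
  have h3 : (-(Int.negSucc m) - 1).toNat = m := by simp [Int.negSucc_eq]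
  have h3' : (-(Int.negSucc n) - 1).toNat = n := by simp [Int.negSucc_eq]
  simp only [PySem.Int.bxor, h2, h2', if_false, h3, h3']

theorem bxor_assoc (a b c : Int) :
    PySem.Int.bxor (PySem.Int.bxor a b) c = PySem.Int.bxor a (PySem.Int.bxor b c) := by
  cases a <;> cases b <;> cases c <;>
    simp [bxor_coe_negSucc, bxor_negSucc_coe, bxor_negSucc_negSucc, Nat.xor_assoc]

theorem bxor_left_comm (a b c : Int) :
    PySem.Int.bxor a (PySem.Int.bxor b c) = PySem.Int.bxor b (PySem.Int.bxor a c) := by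
  rw [← bxor_assoc, PySem.Int.bxor_comm a b, bxor_assoc]

theorem bxor_zero_left (a : Int) : PySem.Int.bxor 0 a = a := by
  rw [PySem.Int.bxor_comm, PySem.Int.bxor_zero]

theorem bxor_self_cancel (a b : Int) : PySem.Int.bxor a (PySem.Int.bxor a b) = b := by
  rw [← bxor_assoc, PySem.Int.bxor_self, bxor_zero_left]

-- ===== VERDICT (by name: the statement is the Claim_ definition above) =====
theorem inv_mix_columns_spec : Claim_equal_inv_mix_columns := by
  intro data _ hpre
  obtain ⟨hlen, hrows⟩ := hpre
  match data, hlen with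
  | r0 :: r1 :: r2 :: r3 :: rest, _ =>
    have h0 := hrows r0 (by simp)
    have h1 := hrows r1 (by simp)
    have h2 := hrows r2 (by simp)
    have h3 := hrows r3 (by simp)
    match r0, h0 with
    | a0 :: b0 :: c0 :: d0 :: t0, _ =>
    match r1, h1 with
    | a1 :: b1 :: c1 :: d1 :: t1, _ =>
    match r2, h2 with
    | a2 :: b2 :: c2 :: d2 :: t2, _ =>
    match r3, h3 with
    | a3 :: b3 :: c3 :: d3 :: t3, _ =>
      show Spec_inv_mix_columns _ _
      unfold Spec_inv_mix_columns inv_mix_columns inv_mix_columns_alt pyMixColumns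
      have hr : PySem.List.pyRange 0 4 1 = [0, 1, 2, 3] := by decide
      simp only [hr, List.foldl, pyMixSingleColumn, List.getD, List.set, Int.toNat,
        List.getElem?_cons_zero, List.getElem?_cons_succ, Option.getD_some]
      simp [bxor_assoc, bxor_left_comm, PySem.Int.bxor_comm,
        bxor_self_cancel, PySem.Int.bxor_self]
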